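-- pv_equiv track=rewrite | github.com/lucabarcelos/tcc | utils.py | max_samples_per_class
-- ===== SOURCE A (Python) =====
-- def max_samples_per_class(dataset, samples_per_class):
--     # Count the number of samples for each class
--     class_counts = {}
--     for _, label in dataset:
--         class_counts[label] = class_counts.get(label, 0) + 1
--
--     # Determine the indices to keep for each class
--     indices_per_class = {label: [] for label in class_counts.keys()}
--     for idx, (_, label) in enumerate(dataset):
--         if len(indices_per_class[label]) < samples_per_class:
--             indices_per_class[label].append(idx)
--
--     # Flatten the list of indices
--     selected_indices = [idx for indices in indices_per_class.values() for idx in indices]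
--
--     return selected_indices
-- ===== SOURCE B (Python) =====
-- def max_samples_per_class(dataset, samples_per_class):
--     # distinct labels in first-appearance order
--     labels = list(dict.fromkeys(label for _, label in dataset))
--     selected = []
--     for lab in labels:
--         taken = 0
--         for idx, (_, lab2) in enumerate(dataset):
--             if lab2 == lab and taken < samples_per_class:
--                 selected.append(idx)
--                 taken += 1
--     return selected
-- ===== Notes on version B (the rewrite author's own statement) =====
-- stated objective: alternative
-- what changed: B builds no dict of index lists at all: it dedups the label sequence and then rescans the whole dataset once per distinct class with a simple counter, collecting that class's first k indices (nested per-class scans instead of A's counting pass + pre-seeded dict + capped single-pass grouping).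
import Mathlib
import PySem

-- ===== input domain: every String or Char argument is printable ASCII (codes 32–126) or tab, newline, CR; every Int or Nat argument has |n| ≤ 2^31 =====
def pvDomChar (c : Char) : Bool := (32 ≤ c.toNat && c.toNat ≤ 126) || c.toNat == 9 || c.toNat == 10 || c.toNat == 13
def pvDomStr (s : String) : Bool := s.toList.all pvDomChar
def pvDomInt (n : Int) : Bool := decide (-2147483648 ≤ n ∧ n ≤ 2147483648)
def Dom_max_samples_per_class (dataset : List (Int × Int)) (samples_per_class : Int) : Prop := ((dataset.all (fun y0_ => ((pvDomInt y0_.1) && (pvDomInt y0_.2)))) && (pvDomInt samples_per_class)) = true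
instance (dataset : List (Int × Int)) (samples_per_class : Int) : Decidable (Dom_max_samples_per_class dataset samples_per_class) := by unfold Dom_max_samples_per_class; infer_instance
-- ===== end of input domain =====

-- B drops A's dict-of-index-lists entirely: it dedups the labels and rescans the dataset once
-- per distinct class with a counter, collecting that class's first k indices (objective: alternative).

-- ===== PORT A =====
def max_samples_per_class (dataset : List (Int × Int)) (samples_per_class : Int) : List Int :=
  -- class_counts = {}; for _, label in dataset: class_counts[label] = class_counts.get(label, 0) + 1
  let class_counts : PySem.Dict Int Int :=
    dataset.foldl (fun d p => d.modify p.2 0 (· + 1)) PySem.Dict.empty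
  -- indices_per_class = {label: [] for label in class_counts.keys()}
  let indices_per_class0 : PySem.Dict Int (List Int) :=
    class_counts.keys.foldl (fun d label => d.insert label ([] : List Int)) PySem.Dict.empty
  -- for idx, (_, label) in enumerate(dataset): if len(...) < samples_per_class: ....append(idx)
  -- (indices_per_class[label] ported as getD/modify with default []: every label is a key, so no KeyError)
  let indices_per_class :=
    (PySem.List.enumerate dataset 0).foldl
      (fun d p =>
        if ((d.getD p.2.2 []).length : Int) < samples_per_class
        then d.modify p.2.2 [] (· ++ [p.1]) else d)
      indices_per_class0
  -- [idx for indices in indices_per_class.values() for idx in indices]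
  indices_per_class.values.flatMap (fun indices => indices)

-- ===== PORT B =====
def max_samples_per_class_alt (dataset : List (Int × Int)) (samples_per_class : Int) : List Int :=
  -- labels = list(dict.fromkeys(label for _, label in dataset))
  let labels := PySem.List.dedup (dataset.map (fun q => q.2))
  -- for lab in labels: taken = 0; for idx, (_, lab2) in enumerate(dataset):
  --   if lab2 == lab and taken < samples_per_class: selected.append(idx); taken += 1
  (labels.foldl
    (fun selected lab =>
      ((PySem.List.enumerate dataset 0).foldl
        (fun st p =>
          if p.2.2 == lab && decide (st.2 < samples_per_class)
          then (st.1 ++ [p.1], st.2 + 1) else st)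
        (selected, (0 : Int))).1)
    ([] : List Int))

-- ===== PRECONDITION & SPEC =====
def Spec_max_samples_per_class (dataset : List (Int × Int)) (samples_per_class : Int) (out : List Int) : Prop := out = max_samples_per_class_alt dataset samples_per_class
instance (dataset : List (Int × Int)) (samples_per_class : Int) (out : List Int) : Decidable (Spec_max_samples_per_class dataset samples_per_class out) := by unfold Spec_max_samples_per_class; infer_instance

-- ===== CLAIM (what is proved, stated in full; the proofs are below) =====
def Claim_equal_max_samples_per_class : Prop := ∀ (dataset : List (Int × Int)) (samples_per_class : Int), Dom_max_samples_per_class dataset samples_per_class → Spec_max_samples_per_class dataset samples_per_class (max_samples_per_class dataset samples_per_class)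

-- ===== LEMMAS AND PROOFS =====

-- indices of the dataset entries labelled c, in ascending order
def pvFullIdx (dataset : List (Int × Int)) (c : Int) : List Int :=
  ((PySem.List.enumerate dataset 0).filter (fun p => p.2.2 == c)).map (fun p => p.1)

-- A's pre-seeded dict {label: [] for label in class_counts.keys()}
def pvSeed (dataset : List (Int × Int)) : PySem.Dict Int (List Int) :=
  ((dataset.foldl (fun d p => d.modify p.2 0 (· + 1))
      (PySem.Dict.empty : PySem.Dict Int Int)).keys).foldl
    (fun d label => d.insert label ([] : List Int)) PySem.Dict.empty

theorem pv_seed_getD_aux (ks : List Int) :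
    ∀ (d : PySem.Dict Int (List Int)), (∀ c, d.getD c [] = []) →
      ∀ c, (ks.foldl (fun d label => d.insert label ([] : List Int)) d).getD c [] = [] := by
  induction ks with
  | nil => intro d h c; simpa using h c
  | cons k ks ih =>
      intro d h c
      simp only [List.foldl_cons]
      refine ih _ (fun c' => ?_) c
      rw [PySem.Dict.getD_insert]
      split <;> simp [h]

theorem pvSeed_getD (dataset : List (Int × Int)) (c : Int) :
    (pvSeed dataset).getD c [] = [] :=
  pv_seed_getD_aux _ PySem.Dict.empty (fun _ => PySem.Dict.getD_empty _ _) c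

theorem pvSeed_keys (dataset : List (Int × Int)) :
    (pvSeed dataset).keys = PySem.Set.ofList (dataset.map (fun q => q.2)) := by
  have hcnt : (dataset.foldl (fun d p => d.modify p.2 0 (· + 1))
      (PySem.Dict.empty : PySem.Dict Int Int)).keys
      = PySem.Set.ofList (dataset.map (fun q => q.2)) := by
    rw [PySem.Dict.keys_foldl_modify_key dataset (fun p => p.2) 0 (fun _ _ v => v + 1)]
    rw [PySem.Dict.keys_empty, PySem.Set.update_nil_left]
  rw [pvSeed, hcnt]
  rw [PySem.Dict.keys_foldl_insert _ (fun _ _ => ([] : List Int)), PySem.Dict.keys_empty,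
    PySem.Set.update_nil_left]
  exact PySem.Set.ofList_eq_self_of_nodup _ (PySem.Set.nodup_ofList _)

theorem pvSeed_keys_nodup (dataset : List (Int × Int)) : (pvSeed dataset).keys.Nodup := by
  rw [pvSeed_keys]; exact PySem.Set.nodup_ofList _

-- the capped appending loop of A computes, per key, the spc-prefix of the full index list
theorem pv_cap_fold (spc : Int) (hspc : 0 ≤ spc) :
    ∀ (l : List (Int × (Int × Int))) (d : PySem.Dict Int (List Int)),
      (∀ c, (d.getD c []).length ≤ spc.toNat) → ∀ c,
      (l.foldl
        (fun d p =>
          if ((d.getD p.2.2 []).length : Int) < spc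
          then d.modify p.2.2 [] (· ++ [p.1]) else d) d).getD c []
      = ((d.getD c []) ++ (l.filter (fun p => p.2.2 == c)).map (fun p => p.1)).take spc.toNat := by
  intro l
  induction l with
  | nil =>
      intro d h c
      simp [List.take_of_length_le (h c)]
  | cons p l ih =>
      intro d h c
      simp only [List.foldl_cons]
      by_cases hcond : ((d.getD p.2.2 []).length : Int) < spc
      · rw [if_pos hcond]
        have hlen : (d.getD p.2.2 []).length < spc.toNat := by omega
        have h' : ∀ c', ((d.modify p.2.2 [] (· ++ [p.1])).getD c' []).length ≤ spc.toNat := by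
          intro c'
          by_cases hc' : c' = p.2.2
          · subst hc'; rw [PySem.Dict.getD_modify_self]; simp; omega
          · rw [PySem.Dict.getD_modify_of_ne _ _ _ hc']; exact h c'
        rw [ih _ h' c]
        by_cases hc : p.2.2 = c
        · subst hc
          rw [PySem.Dict.getD_modify_self]
          simp [List.append_assoc]
        · rw [PySem.Dict.getD_modify_of_ne _ _ _ (fun hcc => hc hcc.symm)]
          simp only [List.filter_cons]
          have : (p.2.2 == c) = false := by simp [hc]
          simp [this]
      · rw [if_neg hcond]
        rw [ih _ h c]
        by_cases hc : p.2.2 = c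
        · subst hc
          have hlen : (d.getD p.2.2 []).length = spc.toNat := by
            have := h p.2.2; omega
          simp only [List.filter_cons, beq_self_eq_true, if_pos]
          rw [List.take_left' hlen, List.take_left' hlen]
        · simp only [List.filter_cons]
          have : (p.2.2 == c) = false := by simp [hc]
          simp [this]

-- A's capped loop never adds a key: every enumerated label is already seeded
theorem pv_cap_keys (spc : Int) :
    ∀ (l : List (Int × (Int × Int))) (d : PySem.Dict Int (List Int)),
      (∀ p ∈ l, p.2.2 ∈ d.keys) →
      (l.foldl
        (fun d p =>
          if ((d.getD p.2.2 []).length : Int) < spc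
          then d.modify p.2.2 [] (· ++ [p.1]) else d) d).keys = d.keys := by
  intro l
  induction l with
  | nil => intro d _; simp
  | cons p l ih =>
      intro d h
      simp only [List.foldl_cons]
      by_cases hcond : ((d.getD p.2.2 []).length : Int) < spc
      · rw [if_pos hcond]
        have hstep : (d.modify p.2.2 [] (· ++ [p.1])).keys = d.keys := by
          rw [PySem.Dict.keys_modify]
          exact PySem.Dict.keys_insert_of_contains _ _
            ((PySem.Dict.contains_iff_mem_keys d p.2.2).2 (h p (by simp)))
        rw [ih _ (fun q hq => by rw [hstep]; exact h q (by simp [hq])), hstep]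
      · rw [if_neg hcond]
        exact ih _ (fun q hq => h q (by simp [hq]))

theorem pv_a_body (dataset : List (Int × Int)) (spc : Int) :
    max_samples_per_class dataset spc =
      List.flatMap (fun indices => indices)
        ((PySem.List.enumerate dataset 0).foldl
          (fun d p =>
            if ((d.getD p.2.2 []).length : Int) < spc
            then d.modify p.2.2 [] (· ++ [p.1]) else d)
          (pvSeed dataset)).values := rfl

theorem pv_a_eq (dataset : List (Int × Int)) (spc : Int) (hspc : 0 ≤ spc) :
    max_samples_per_class dataset spc =
      (PySem.Set.ofList (dataset.map (fun q => q.2))).flatMap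
        (fun c => (pvFullIdx dataset c).take spc.toNat) := by
  rw [pv_a_body]
  have hmem : ∀ p ∈ PySem.List.enumerate dataset 0, p.2.2 ∈ (pvSeed dataset).keys := by
    intro p hp
    rw [pvSeed_keys, PySem.Set.mem_ofList]
    have : p.2 ∈ dataset := by
      rw [← PySem.List.map_snd_enumerate dataset 0]
      exact List.mem_map_of_mem hp
    exact List.mem_map_of_mem this
  set dA := (PySem.List.enumerate dataset 0).foldl
      (fun d p =>
        if ((d.getD p.2.2 []).length : Int) < spc
        then d.modify p.2.2 [] (· ++ [p.1]) else d) (pvSeed dataset) with hdA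
  have hkeysA : dA.keys = PySem.Set.ofList (dataset.map (fun q => q.2)) := by
    rw [hdA, pv_cap_keys spc _ _ hmem, pvSeed_keys]
  have hgetA : ∀ c, dA.getD c [] = (pvFullIdx dataset c).take spc.toNat := by
    intro c
    rw [hdA, pv_cap_fold spc hspc _ _ (fun c' => by rw [pvSeed_getD]; simp) c, pvSeed_getD]
    rfl
  have hndA : dA.keys.Nodup := by rw [hkeysA]; exact PySem.Set.nodup_ofList _
  rw [PySem.Dict.values_eq_map_keys dA hndA ([] : List Int), hkeysA]
  rw [List.flatMap_map]
  refine List.flatMap_congr (fun c _ => ?_)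
  rw [hgetA]

-- for a negative cap A's appending condition never fires: the dict stays all-empty
theorem pv_a_neg (dataset : List (Int × Int)) (spc : Int) (hspc : spc < 0) :
    max_samples_per_class dataset spc = [] := by
  rw [pv_a_body]
  have hid : ∀ (l : List (Int × (Int × Int))) (d : PySem.Dict Int (List Int)),
      (l.foldl
        (fun d p =>
          if ((d.getD p.2.2 []).length : Int) < spc
          then d.modify p.2.2 [] (· ++ [p.1]) else d) d) = d := by
    intro l
    induction l with
    | nil => intro d; rfl
    | cons p l ih =>
        intro d
        simp only [List.foldl_cons]
        rw [if_neg (by have := Int.natCast_nonneg (d.getD p.2.2 []).length; omega), ih]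
  rw [hid]
  rw [PySem.Dict.values_eq_map_keys (pvSeed dataset) (pvSeed_keys_nodup dataset) ([] : List Int)]
  refine List.flatMap_eq_nil_iff.mpr (fun x hx => ?_)
  obtain ⟨k, -, rfl⟩ := List.mem_map.mp hx
  exact pvSeed_getD dataset k

-- B's inner rescan with a counter collects the (spc - t)-prefix of the remaining class indices
theorem pv_inner_fold (spc lab : Int) :
    ∀ (l : List (Int × (Int × Int))) (res : List Int) (t : Int), 0 ≤ t →
      ((l.foldl
        (fun st p =>
          if p.2.2 == lab && decide (st.2 < spc)
          then (st.1 ++ [p.1], st.2 + 1) else st)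
        (res, t)).1
      = res ++ ((l.filter (fun p => p.2.2 == lab)).map (fun p => p.1)).take (spc - t).toNat) := by
  intro l
  induction l with
  | nil => intro res t _; simp
  | cons p l ih =>
      intro res t ht
      rw [List.foldl_cons]
      by_cases hlab : (p.2.2 == lab) = true
      · by_cases hcnt : t < spc
        · have hc : (p.2.2 == lab && decide (t < spc)) = true := by simp [hlab, hcnt]
          rw [if_pos hc, ih (res ++ [p.1]) (t + 1) (by omega)]
          have ht' : (spc - t).toNat = (spc - (t + 1)).toNat + 1 := by omega
          simp [hlab, ht', List.take_succ_cons]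
        · have hc : ¬ ((p.2.2 == lab && decide (t < spc)) = true) := by simp [hcnt]
          rw [if_neg hc, ih res t ht]
          have ht' : (spc - t).toNat = 0 := by omega
          simp [hlab, ht']
      · have hc : ¬ ((p.2.2 == lab && decide (t < spc)) = true) := by simp [hlab]
        rw [if_neg hc, ih res t ht]
        simp [hlab]

theorem pv_alt_eq (dataset : List (Int × Int)) (spc : Int) :
    max_samples_per_class_alt dataset spc =
      (PySem.Set.ofList (dataset.map (fun q => q.2))).flatMap
        (fun c => (pvFullIdx dataset c).take spc.toNat) := by
  have hbody : max_samples_per_class_alt dataset spc =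
      (PySem.List.dedup (dataset.map (fun q => q.2))).foldl
        (fun selected lab =>
          ((PySem.List.enumerate dataset 0).foldl
            (fun st p =>
              if p.2.2 == lab && decide (st.2 < spc)
              then (st.1 ++ [p.1], st.2 + 1) else st)
            (selected, (0 : Int))).1)
        ([] : List Int) := rfl
  rw [hbody, PySem.List.dedup_eq_ofList]
  have hstep : ∀ (selected : List Int) (lab : Int),
      ((PySem.List.enumerate dataset 0).foldl
        (fun st p =>
          if p.2.2 == lab && decide (st.2 < spc)
          then (st.1 ++ [p.1], st.2 + 1) else st)
        (selected, (0 : Int))).1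
      = selected ++ (pvFullIdx dataset lab).take spc.toNat := by
    intro selected lab
    rw [pv_inner_fold spc lab _ selected 0 le_rfl]
    simp [pvFullIdx]
  calc (PySem.Set.ofList (dataset.map (fun q => q.2))).foldl
        (fun selected lab =>
          ((PySem.List.enumerate dataset 0).foldl
            (fun st p =>
              if p.2.2 == lab && decide (st.2 < spc)
              then (st.1 ++ [p.1], st.2 + 1) else st)
            (selected, (0 : Int))).1)
        ([] : List Int)
      = (PySem.Set.ofList (dataset.map (fun q => q.2))).foldl
          (fun selected lab => selected ++ (pvFullIdx dataset lab).take spc.toNat)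
          ([] : List Int) := by
        exact PySem.List.foldl_congr_mem _ _ _ _ (fun acc lab _ => hstep acc lab)
    _ = _ := by
        rw [PySem.List.foldl_append_eq_flatMap]
        simp

-- ===== VERDICT (by name: the statement is the Claim_ definition above) =====
theorem max_samples_per_class_spec : Claim_equal_max_samples_per_class := by
  intro dataset spc _
  unfold Spec_max_samples_per_class
  by_cases hpos : 0 ≤ spc
  · rw [pv_a_eq dataset spc hpos, pv_alt_eq dataset spc]
  · have hneg : spc < 0 := by omega
    rw [pv_a_neg dataset spc hneg, pv_alt_eq dataset spc]
    refine (List.flatMap_eq_nil_iff.mpr (fun c _ => ?_)).symm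
    rw [Int.toNat_of_nonpos (by omega), List.take_zero]
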